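-- pv_equiv track=rewrite | github.com/kmanu225/cryptoword | algorithms/classical/cesar/utils.py | striper
-- ===== SOURCE A (Python) =====
-- def striper(text):
--     special_caracters = [
--         " ",
--         "\n",
--         "\t",
--         ".",
--         ",",
--         ";",
--         ":",
--         "!",
--         "?",
--         "(",
--         ")",
--         "[",
--         "]",
--         "{",
--         "}",
--         "'",
--         '"',
--         "-",
--     ]
--     for car in special_caracters:
--         text = text.replace(car, "")
--     return text.lower()
-- ===== SOURCE B (Python) =====
-- SPECIAL = " \n\t.,;:!?()[]{}'\"-"
--
-- def striper(text):
--     # Single pass: filter out the special characters, then lowercase.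
--     return ''.join(c for c in text if c not in SPECIAL).lower()
-- ===== Notes on version B (the rewrite author's own statement) =====
-- stated objective: idiomatic
-- what changed: One filtering pass over the text with a membership test replaces eighteen successive str.replace scans of the whole string.
import Mathlib
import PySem

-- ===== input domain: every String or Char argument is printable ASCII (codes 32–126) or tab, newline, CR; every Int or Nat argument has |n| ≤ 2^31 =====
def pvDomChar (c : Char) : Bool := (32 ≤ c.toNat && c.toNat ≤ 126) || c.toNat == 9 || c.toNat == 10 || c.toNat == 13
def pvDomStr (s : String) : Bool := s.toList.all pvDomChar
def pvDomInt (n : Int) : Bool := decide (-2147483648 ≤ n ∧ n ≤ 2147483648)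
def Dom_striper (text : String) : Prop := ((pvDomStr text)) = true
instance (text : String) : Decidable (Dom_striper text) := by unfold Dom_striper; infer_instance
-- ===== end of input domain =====

-- B: one filtering pass with a membership test instead of eighteen successive str.replace scans; same result, proved equal.
-- ===== PORT A =====
-- the 18 special characters, as one-character strings, in A's order
def striperSpecials : List String :=
  [" ", "\n", "\t", ".", ",", ";", ":", "!", "?", "(", ")", "[", "]", "{", "}", "'", "\"", "-"]

def striper (text : String) : String :=
  PySem.Str.lower (striperSpecials.foldl (fun t car => PySem.Str.replace t car "") text)

-- ===== PORT B =====
-- Source B's SPECIAL string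
def striperSpecialChars : List Char := " \n\t.,;:!?()[]{}'\"-".toList

-- ''.join(c for c in text if c not in SPECIAL).lower()
def striper_alt (text : String) : String :=
  PySem.Str.lower (String.ofList (text.toList.filter (fun c => !(striperSpecialChars.contains c))))

-- ===== PRECONDITION & SPEC =====
def Spec_striper (text : String) (out : String) : Prop := out = striper_alt text
instance (text : String) (out : String) : Decidable (Spec_striper text out) := by unfold Spec_striper; infer_instance

-- ===== CLAIM (what is proved, stated in full; the proofs are below) =====
def Claim_equal_striper : Prop := ∀ (text : String), Dom_striper text → Spec_striper text (striper text)

-- ===== LEMMAS AND PROOFS =====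

-- replace.go with a single-char pattern and empty replacement is a filter
theorem replace_go_filter (c : Char) : ∀ (fuel : Nat) (l acc : List Char), l.length ≤ fuel →
    PySem.Chars.replace.go [c] [] fuel l acc = acc.reverse ++ l.filter (fun x => !(x == c)) := by
  intro fuel
  induction fuel with
  | zero => intro l acc h; simp at h; simp [h, PySem.Chars.replace.go]
  | succ n ih =>
    intro l acc h
    cases l with
    | nil => simp [PySem.Chars.replace.go]
    | cons a t =>
      rw [PySem.Chars.replace.go]
      by_cases hac : a = c
      · subst hac
        simp [List.isPrefixOf, ih t acc (by simpa using h)]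
      · have hp : [c].isPrefixOf (a :: t) = false := by
          simp [List.isPrefixOf]; exact fun h' => hac h'.symm
        simp [hp, hac, ih t (a :: acc) (by simpa using h)]

theorem replace_single_filter (c : Char) (cs : List Char) :
    PySem.Chars.replace cs [c] [] = cs.filter (fun x => !(x == c)) := by
  rw [PySem.Chars.replace]
  simp [replace_go_filter c cs.length cs [] le_rfl]

-- a chain of single-char removals is one filter against the char list
theorem foldl_replace_filter : ∀ (cars : List Char) (cs : List Char),
    cars.foldl (fun t car => PySem.Chars.replace t [car] []) cs
      = cs.filter (fun x => !(cars.contains x)) := by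
  intro cars
  induction cars with
  | nil => intro cs; simp
  | cons a t ih =>
    intro cs
    rw [List.foldl_cons, ih, replace_single_filter, List.filter_filter]
    congr 1
    funext x
    by_cases hx : x = a <;> simp [hx]

-- the String-level replace chain, moved to the char-list side
theorem foldl_str_replace (cars : List String) : ∀ (s : String),
    (cars.foldl (fun t car => PySem.Str.replace t car "") s).toList
      = (cars.map String.toList).foldl (fun t car => PySem.Chars.replace t car []) s.toList := by
  induction cars with
  | nil => intro s; simp
  | cons a t ih =>
    intro s
    simp only [List.foldl_cons, List.map_cons, ih]
    congr 1
    simp [PySem.Str.replace]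

-- A's 18 one-character strings are exactly the characters of Source B's SPECIAL string
set_option maxRecDepth 4096 in
theorem specials_toList :
    striperSpecials.map String.toList = striperSpecialChars.map (fun c => [c]) := by
  rfl

-- ===== VERDICT (by name: the statement is the Claim_ definition above) =====
set_option maxRecDepth 8192 in
set_option maxHeartbeats 1000000 in
theorem striper_spec : Claim_equal_striper := by
  intro text _
  show striper text = striper_alt text
  unfold striper striper_alt
  apply String.toList_inj.mp
  simp only [PySem.Str.toList_lower]
  apply congrArg
  simp only [foldl_str_replace, specials_toList, List.foldl_map, foldl_replace_filter,
    String.toList_ofList]
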